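-- pv_equiv track=rewrite | github.com/su-ram/Problem-Solving | SWEA/Baby_Gin.py | isrun
-- ===== SOURCE A (Python) =====
-- def isrun(arr):
--     cnt = 0
--     for i in arr:
--         if i == 1:
--             cnt += 1
--         elif i == 0:
--             if cnt >= 3:
--                 return True
--             cnt = 0
--     return False
-- ===== SOURCE B (Python) =====
-- def isrun(arr):
--     seg_start = 0
--     for j, v in enumerate(arr):
--         if v == 0:
--             if arr[seg_start:j].count(1) >= 3:
--                 return True
--             seg_start = j + 1
--     return False
-- ===== Notes on version B (the rewrite author's own statement) =====
-- stated objective: alternative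
-- what changed: Replaces the running 1s-counter with a segment decomposition: track the start of the current zero-delimited segment and, at each 0, count the 1s in the slice arr[seg_start:j], never examining the trailing segment.
import Mathlib
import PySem

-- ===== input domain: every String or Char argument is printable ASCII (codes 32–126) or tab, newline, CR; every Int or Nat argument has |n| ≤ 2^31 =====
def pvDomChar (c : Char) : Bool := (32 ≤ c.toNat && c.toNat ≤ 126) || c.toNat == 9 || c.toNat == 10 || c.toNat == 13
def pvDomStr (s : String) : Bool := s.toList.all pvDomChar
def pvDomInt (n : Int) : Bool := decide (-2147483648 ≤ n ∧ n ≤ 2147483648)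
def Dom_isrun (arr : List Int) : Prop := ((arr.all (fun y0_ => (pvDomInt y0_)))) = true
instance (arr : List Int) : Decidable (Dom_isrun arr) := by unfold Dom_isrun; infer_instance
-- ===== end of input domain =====

-- B replaces A's running 1s-counter with a zero-delimited segment decomposition
-- (count 1s in the slice since the last zero); alternative decomposition, same cost.


-- ===== PORT A =====
def isrunLoop : List Int → Int → Bool
  | [], _ => false
  | i :: rest, cnt =>
    if i = 1 then isrunLoop rest (cnt + 1)
    else if i = 0 then
      if cnt ≥ 3 then true else isrunLoop rest 0
    else isrunLoop rest cnt

def isrun (arr : List Int) : Bool := isrunLoop arr 0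

-- ===== PORT B =====
def isrunAltGo (arr : List Int) : List (Int × Int) → Int → Bool
  | [], _ => false
  | (j, v) :: rest, segStart =>
    if v = 0 then
      if ((PySem.List.slice arr (some segStart) (some j)).count 1 : Int) ≥ 3 then true
      else isrunAltGo arr rest (j + 1)
    else isrunAltGo arr rest segStart

def isrun_alt (arr : List Int) : Bool := isrunAltGo arr (PySem.List.enumerate arr 0) 0

-- ===== PRECONDITION & SPEC =====
def Spec_isrun (arr : List Int) (out : Bool) : Prop := out = isrun_alt arr
instance (arr : List Int) (out : Bool) : Decidable (Spec_isrun arr out) := by unfold Spec_isrun; infer_instance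

-- ===== CLAIM (what is proved, stated in full; the proofs are below) =====
def Claim_equal_isrun : Prop := ∀ (arr : List Int), Dom_isrun arr → Spec_isrun arr (isrun arr)

-- ===== LEMMAS AND PROOFS =====

theorem take_succ_of_drop_cons (arr rest : List Int) (v : Int) (s k : Nat)
    (hsk : s ≤ k) (hd : arr.drop k = v :: rest) :
    (arr.drop s).take (k + 1 - s) = (arr.drop s).take (k - s) ++ [v] := by
  have hdd : (arr.drop s).drop (k - s) = v :: rest := by
    rw [List.drop_drop]
    have hk : s + (k - s) = k := by omega
    rwa [hk]
  have h1 : k + 1 - s = (k - s) + 1 := by omega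
  rw [h1, List.take_add, hdd]
  simp

theorem drop_succ_of_drop_cons (arr rest : List Int) (v : Int) (k : Nat)
    (hd : arr.drop k = v :: rest) : arr.drop (k + 1) = rest := by
  have h := congrArg (List.drop 1) hd
  simpa [List.drop_drop] using h

theorem isrun_go_eq (l : List Int) : ∀ (arr : List Int) (s k : Nat),
    s ≤ k → arr.drop k = l →
    isrunAltGo arr (PySem.List.enumerate l (k : Int)) (s : Int)
      = isrunLoop l (((arr.drop s).take (k - s)).count 1 : Int) := by
  induction l with
  | nil => intro arr s k _ _; simp [PySem.List.enumerate, isrunAltGo, isrunLoop]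
  | cons v rest ih =>
    intro arr s k hsk hd
    rw [PySem.List.enumerate_cons]
    have htake := take_succ_of_drop_cons arr rest v s k hsk hd
    have hd' : arr.drop (k + 1) = rest := drop_succ_of_drop_cons arr rest v k hd
    by_cases h0 : v = 0
    · subst h0
      by_cases hc : (((arr.drop s).take (k - s)).count 1 : Int) ≥ 3
      · simp [isrunAltGo, isrunLoop, PySem.List.slice_natCast, hc]
      · have hih := ih arr (k + 1) (k + 1) le_rfl hd'
        push_cast at hih
        simp only [Nat.sub_self, List.take_zero, List.count_nil, Nat.cast_zero] at hih
        simp [isrunAltGo, isrunLoop, PySem.List.slice_natCast, hc, hih]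
    · have hih := ih arr s (k + 1) (by omega) hd'
      push_cast at hih
      rw [htake] at hih
      by_cases h1 : v = 1
      · subst h1
        simp only [isrunAltGo, isrunLoop, if_neg h0]
        rw [hih]
        congr 1
        rw [List.count_append]
        push_cast
        simp
      · simp only [isrunAltGo, isrunLoop, if_neg h0, if_neg h1]
        rw [hih]
        congr 1
        rw [List.count_append]
        have hv : List.count 1 [v] = 0 := by
          simpa [List.count_cons] using h1
        rw [hv]
        simp
-- ===== VERDICT (by name: the statement is the Claim_ definition above) =====
theorem isrun_spec : Claim_equal_isrun := by
  intro arr _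
  unfold Spec_isrun isrun isrun_alt
  have := isrun_go_eq arr arr 0 0 le_rfl rfl
  simpa using this.symm
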